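-- pv_equiv track=rewrite | github.com/TomKarachristos/Algorithm-Solutions | Code-Jam/Code-Jam_RoundA_2008/Milkshake.py | serve_customers
-- ===== SOURCE A (Python) =====
-- def serve_customers(ans, customers):
--     for index in range(len(customers)):
--         has_connect = False
--         malted_position = -1
--         customer = customers[index]
--         for two_step in range(1, customer[0]*2, 2):
--             position = customer[two_step]-1 # indexing start from 0
--             if (ans[position] == customer[two_step + 1]):
--                 has_connect = True
--                 break
--             else:
--                 if (ans[position] == 0 and customer[two_step + 1] == 1):
--                     malted_position = position
--
--         if (not has_connect):
--             if (malted_position != -1):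
--                 ans[malted_position] = 1
--                 # Now that we melt lets solve the problem again
--                 return serve_customers(ans, customers)
--             else:
--                 return False
--     return True
-- ===== SOURCE B (Python) =====
-- def serve_customers(ans, customers):
--     # Worklist unit propagation instead of A's flip-and-restart-from-scratch:
--     # customers are decoded once (lazily, on first visit) into (flavor, malted)
--     # pairs, a per-flavor index of decoded referencing customers is kept, and
--     # after flipping a flavor only the already-checked customers referencing it
--     # are re-queued (everything not yet visited is still in the queue anyway).
--     # Like A, this mutates ans in place (flips entries to 1).
--     prefs = {}
--     index = {}
--
--     def decode(ci):
--         if ci not in prefs: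
--             c = customers[ci]
--             ps = [(c[2 * i + 1] - 1, c[2 * i + 2]) for i in range(c[0])]
--             prefs[ci] = ps
--             for f, m in ps:
--                 index[f] = index.get(f, []) + [ci]
--         return prefs[ci]
--
--     pending = list(range(len(customers)))
--     while pending:
--         ci = pending.pop(0)
--         ps = decode(ci)
--         if any(ans[f] == m for f, m in ps):
--             continue
--         flip = next((f for f, m in ps if ans[f] == 0 and m == 1), None)
--         if flip is None:
--             return False
--         ans[flip] = 1
--         pending.extend(index[flip])
--     return True
-- ===== Notes on version B (the rewrite author's own statement) =====
-- stated objective: faster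
-- what changed: A restarts the whole customer scan from scratch (recursively re-decoding and re-checking every customer) after every single flip; B decodes each customer once into (flavor, malted) pairs, keeps a per-flavor index of decoded referencing customers, and after a flip re-queues only the customers that reference the flipped flavor (worklist unit propagation).
-- outside the precondition, e.g. on serve_customers([0, 0], [[2, 1, 1, 2, 1], [1, 1, 0]]): A returns True, B returns False; on serve_customers([0, 2], [[1, 1, 1], [1, 2, 2]]): A returns True, B returns True
import Mathlib
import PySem

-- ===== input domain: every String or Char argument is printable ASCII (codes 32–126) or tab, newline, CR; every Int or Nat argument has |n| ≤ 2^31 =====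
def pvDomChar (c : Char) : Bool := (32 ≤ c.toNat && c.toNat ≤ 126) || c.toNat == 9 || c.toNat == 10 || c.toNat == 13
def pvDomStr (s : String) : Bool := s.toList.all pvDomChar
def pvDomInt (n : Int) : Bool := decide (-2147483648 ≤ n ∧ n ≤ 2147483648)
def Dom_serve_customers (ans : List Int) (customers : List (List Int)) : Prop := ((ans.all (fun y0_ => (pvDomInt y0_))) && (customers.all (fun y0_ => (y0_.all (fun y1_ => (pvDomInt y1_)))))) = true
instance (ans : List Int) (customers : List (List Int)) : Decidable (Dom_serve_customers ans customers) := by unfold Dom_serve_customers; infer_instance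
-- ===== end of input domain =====

-- B replaces A's flip-and-restart-from-scratch greedy by a worklist unit propagation with a
-- per-flavor index of referencing customers; equivalence is about the RETURN value (both
-- Pythons mutate `ans` in place, flipping entries to 1, though not necessarily to the same
-- final state when they return False).

-- ===== PORT A =====
-- inner 'for two_step in range(1, customer[0]*2, 2)' loop; state = (has_connect, malted_position),
-- 'break' = returning (true, mp) immediately.
def innerA (ans c : List Int) : List Int → Int → Bool × Int
  | [], mp => (false, mp)
  | t :: ts, mp =>
    let position := PySem.List.pyGetD c t 0 - 1
    if PySem.List.pyGetD ans position 0 = PySem.List.pyGetD c (t + 1) 0 then (true, mp)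
    else if PySem.List.pyGetD ans position 0 = 0 ∧ PySem.List.pyGetD c (t + 1) 0 = 1 then
      innerA ans c ts position
    else innerA ans c ts mp

-- outer 'for index in range(len(customers))' loop over the remaining suffix `rest`;
-- the Python recursion 'return serve_customers(ans, customers)' is the fuelled restart
-- (fuel only decreases at a restart; A flips a 0 to 1 before each restart, so
-- len(ans)+1 fuel is enough on the admitted inputs).
def serveAuxA : Nat → List Int → List (List Int) → List (List Int) → Bool
  | _, _, _, [] => true
  | fuel, ans, customers, c :: rest =>
    let r := innerA ans c (PySem.List.pyRange 1 (PySem.List.pyGetD c 0 0 * 2) 2) (-1)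
    if r.1 then serveAuxA fuel ans customers rest
    else if r.2 ≠ -1 then
      match fuel with
      | 0 => false
      | fuel' + 1 => serveAuxA fuel' (PySem.List.pySetD ans r.2 1) customers customers
    else false
  termination_by fuel _ _ rest => (fuel, rest.length)

def serve_customers (ans : List Int) (customers : List (List Int)) : Bool :=
  serveAuxA (ans.length + 1) ans customers customers

-- ===== PORT B =====
-- [(c[2*i+1]-1, c[2*i+2]) for i in range(c[0])]
def pvDecode (c : List Int) : List (Int × Int) :=
  (PySem.List.pyRange 0 (PySem.List.pyGetD c 0 0) 1).map
    (fun i => (PySem.List.pyGetD c (2 * i + 1) 0 - 1, PySem.List.pyGetD c (2 * i + 2) 0))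

-- decode(ci): memoised decoding; on a miss it also extends the per-flavor
-- index ('index[f] = index.get(f, []) + [ci]')
def pvDecodeStep (customers : List (List Int))
    (prefs : PySem.Dict Int (List (Int × Int))) (index : PySem.Dict Int (List Int)) (ci : Int) :
    List (Int × Int) × PySem.Dict Int (List (Int × Int)) × PySem.Dict Int (List Int) :=
  match prefs.get? ci with
  | some ps => (ps, prefs, index)
  | none =>
    let c := PySem.List.pyGetD customers ci []
    let ps := pvDecode c
    (ps, prefs.insert ci ps,
      ps.foldl (fun d q => d.modify q.1 [] (fun l => l ++ [ci])) index)

-- the 'while pending' loop; 'pending.pop(0)' is taking the head,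
-- 'pending.extend(l)' appends at the end.  The fuel is a totality guard only
-- (the Python while loop is unbounded).
def pvLoopB (customers : List (List Int)) :
    Nat → List Int → List Int → PySem.Dict Int (List (Int × Int)) → PySem.Dict Int (List Int) → Bool
  | _, _, [], _, _ => true
  | 0, _, _ :: _, _, _ => false
  | fuel + 1, ans, ci :: rest, prefs, index =>
    let r := pvDecodeStep customers prefs index ci
    if r.1.any (fun q => PySem.List.pyGetD ans q.1 0 == q.2) then
      pvLoopB customers fuel ans rest r.2.1 r.2.2
    else
      match r.1.find? (fun q => PySem.List.pyGetD ans q.1 0 == 0 && q.2 == 1) with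
      | none => false
      | some q =>
        pvLoopB customers fuel (PySem.List.pySetD ans q.1 1)
          (rest ++ r.2.2.getD q.1 []) r.2.1 r.2.2

def serve_customers_alt (ans : List Int) (customers : List (List Int)) : Bool :=
  let fuel := ((customers.map (fun c => (PySem.List.pyGetD c 0 0).toNat)).sum + customers.length + 1) *
    (ans.count 0 + 1)
  pvLoopB customers fuel ans (PySem.List.pyRange 0 (customers.length : Int) 1)
    PySem.Dict.empty PySem.Dict.empty

-- Boolean helpers used by the precondition (customer satisfied / has a
-- flippable malted pair / is readable without an IndexError)
def pvSatB (a c : List Int) : Bool :=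
  (pvDecode c).any (fun q => PySem.List.pyGetD a q.1 0 == q.2)

def pvFlipableB (a c : List Int) : Bool :=
  (pvDecode c).any (fun q => (PySem.List.pyGetD a q.1 0 == 0) && (q.2 == 1))

def pvReadableB (ans c : List Int) : Bool :=
  (!c.isEmpty) &&
  (decide (PySem.List.pyGetD c 0 0 ≤ 0) || decide (2 * PySem.List.pyGetD c 0 0 < (c.length : Int))) &&
  (pvDecode c).all (fun q =>
    decide (-(ans.length : Int) ≤ q.1) && decide (q.1 < (ans.length : Int)))

-- ===== PRECONDITION & SPEC =====
-- Pre_ admits (a) the problem's wellformed instances (binary ans, customers encoded as a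
-- count followed by that many in-range 1-based (flavor, malted) pairs, at most one malted
-- pair per customer), and (b) instances that are decided by the first scan before any malt
-- flip (a readable prefix of already-satisfied customers followed by an unsatisfiable
-- customer, or all customers satisfied as given); outside these A raises IndexError, or
-- (with several malted pairs in one customer) A's and B's flip choices are both defensible
-- greedy choices and may differ.
def Pre_serve_customers (ans : List Int) (customers : List (List Int)) : Prop :=
  ((∀ a ∈ ans, a = 0 ∨ a = 1) ∧
    ∀ c ∈ customers,
      (pvReadableB ans c &&
        (pvDecode c).all (fun q => decide (0 ≤ q.1)) &&
        decide (((pvDecode c).filter (fun q => q.2 == 1)).length ≤ 1)) = true) ∨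
  (∃ j < customers.length + 1,
    (∀ i < j, (pvReadableB ans (customers.getD i []) &&
      pvSatB ans (customers.getD i [])) = true) ∧
    (j = customers.length ∨
      (pvReadableB ans (customers.getD j []) &&
        !pvSatB ans (customers.getD j []) &&
        !pvFlipableB ans (customers.getD j [])) = true))

instance (ans : List Int) (customers : List (List Int)) : Decidable (Pre_serve_customers ans customers) := by
  unfold Pre_serve_customers; infer_instance

def pvWitness_serve_customers : List Int × List (List Int) :=
  ([0, 0], [[1, 1, 0], [2, 1, 1, 2, 0]])

def Spec_serve_customers (ans : List Int) (customers : List (List Int)) (out : Bool) : Prop := out = serve_customers_alt ans customers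
instance (ans : List Int) (customers : List (List Int)) (out : Bool) : Decidable (Spec_serve_customers ans customers out) := by unfold Spec_serve_customers; infer_instance

-- ===== CLAIM (what is proved, stated in full; the proofs are below) =====
def Claim_equal_serve_customers : Prop := ∀ (ans : List Int) (customers : List (List Int)), Dom_serve_customers ans customers → Pre_serve_customers ans customers → Spec_serve_customers ans customers (serve_customers ans customers)

-- ===== LEMMAS AND PROOFS =====

-- binary entries / satisfied customer / monotone extension / satisfiability (the shared spec)
def pvBin (a : List Int) : Prop := ∀ x ∈ a, x = 0 ∨ x = 1

def pvSatC (a c : List Int) : Prop := ∃ q ∈ pvDecode c, PySem.List.pyGetD a q.1 0 = q.2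

def pvExt (a a' : List Int) : Prop :=
  a'.length = a.length ∧ pvBin a' ∧
  ∀ i : Int, 0 ≤ i → i < (a.length : Int) →
    PySem.List.pyGetD a i 0 = 1 → PySem.List.pyGetD a' i 0 = 1

def pvSat (a : List Int) (cs : List (List Int)) : Prop :=
  ∃ a', pvExt a a' ∧ ∀ c ∈ cs, pvSatC a' c

def pvWfC (n : Int) (c : List Int) : Prop :=
  (∀ q ∈ pvDecode c, 0 ≤ q.1 ∧ q.1 < n) ∧
  ((pvDecode c).filter (fun q => q.2 == 1)).length ≤ 1

-- ---- small facts about get/set ----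
theorem pv_get_set (a : List Int) (i j v : Int) (hi0 : 0 ≤ i) (_hil : i < (a.length : Int))
    (hj0 : 0 ≤ j) (hjl : j < (a.length : Int)) :
    PySem.List.pyGetD (PySem.List.pySetD a i v) j 0 =
      if j = i then v else PySem.List.pyGetD a j 0 := by
  rw [PySem.List.pySetD_of_nonneg a v hi0]
  rw [PySem.List.pyGetD_eq_getElem _ _ hj0 (by simpa using hjl)]
  rw [PySem.List.pyGetD_eq_getElem _ _ hj0 hjl]
  rw [List.getElem_set]
  by_cases h : j = i
  · rw [if_pos h, if_pos (by omega)]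
  · rw [if_neg h, if_neg (by omega)]

theorem pvBin_set (a : List Int) (i : Int) (hi0 : 0 ≤ i) (hb : pvBin a) :
    pvBin (PySem.List.pySetD a i 1) := by
  intro x hx
  rw [PySem.List.pySetD_of_nonneg a 1 hi0] at hx
  rcases List.mem_or_eq_of_mem_set hx with h | h
  · exact hb x h
  · right; exact h

theorem pv_count_set_aux : ∀ (a : List Int) (k : Nat) (hk : k < a.length), a[k] = 0 →
    (a.set k 1).count 0 < a.count 0 := by
  intro a
  induction a with
  | nil => intro k hk; simp at hk
  | cons x xs ih =>
    intro k hk h0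
    cases k with
    | zero => simp_all
    | succ k =>
      simp only [List.set_cons_succ, List.count_cons]
      have := ih k (by simpa using hk) (by simpa using h0)
      omega

theorem pv_count_set_lt (a : List Int) (i : Int) (hi0 : 0 ≤ i) (hil : i < (a.length : Int))
    (h0 : PySem.List.pyGetD a i 0 = 0) :
    (PySem.List.pySetD a i 1).count 0 < a.count 0 := by
  rw [PySem.List.pySetD_of_nonneg a 1 hi0]
  rw [PySem.List.pyGetD_eq_getElem _ _ hi0 hil] at h0
  exact pv_count_set_aux a i.toNat (by omega) h0

theorem pvExt_refl (a : List Int) (hb : pvBin a) : pvExt a a :=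
  ⟨rfl, hb, fun _ _ _ h => h⟩

-- ---- the two key semantic lemmas ----
def pvFp (a : List Int) (q : Int × Int) : Prop := PySem.List.pyGetD a q.1 0 = 0 ∧ q.2 = 1

-- an unsatisfied customer with no flippable pair stays unsatisfied under every extension
theorem pvStuck (a c : List Int) (hb : pvBin a)
    (hw : ∀ q ∈ pvDecode c, 0 ≤ q.1 ∧ q.1 < (a.length : Int))
    (hns : ¬ pvSatC a c) (hnf : ∀ q ∈ pvDecode c, ¬ pvFp a q) :
    ∀ a', pvExt a a' → ¬ pvSatC a' c := by
  rintro a' ⟨hlen, hb', hmono⟩ ⟨q, hq, hval⟩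
  obtain ⟨hq0, hq1⟩ := hw q hq
  have hmem : PySem.List.pyGetD a q.1 0 ∈ a :=
    PySem.List.pyGetD_mem a 0 (by simp only [PySem.Raise.InRange]; omega)
  rcases hb _ hmem with h0 | h1
  · have hq2 : q.2 ≠ 1 := fun h => hnf q hq ⟨h0, h⟩
    have hmem' : PySem.List.pyGetD a' q.1 0 ∈ a' :=
      PySem.List.pyGetD_mem a' 0 (by simp only [PySem.Raise.InRange]; omega)
    rcases hb' _ hmem' with h0' | h1'
    · exact hns ⟨q, hq, by rw [h0, ← hval, h0']⟩
    · exact hq2 (by rw [← hval, h1'])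
  · have := hmono q.1 hq0 hq1 h1
    exact hns ⟨q, hq, by rw [h1, ← hval, this]⟩

theorem pv_mem_len_le_one {α : Type} {l : List α} (h : l.length ≤ 1) {x y : α}
    (hx : x ∈ l) (hy : y ∈ l) : x = y := by
  match l with
  | [] => simp at hx
  | [a] => simp at hx hy; rw [hx, hy]
  | a :: b :: t => simp at h

theorem pvFlip (a c : List Int) (cs : List (List Int)) (q0 : Int × Int)
    (hb : pvBin a) (hc : c ∈ cs)
    (hw : ∀ q ∈ pvDecode c, 0 ≤ q.1 ∧ q.1 < (a.length : Int))
    (hu : ((pvDecode c).filter (fun q => q.2 == 1)).length ≤ 1)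
    (hns : ¬ pvSatC a c) (hq0 : q0 ∈ pvDecode c)
    (_h0 : PySem.List.pyGetD a q0.1 0 = 0) (h1 : q0.2 = 1) :
    (pvSat (PySem.List.pySetD a q0.1 1) cs ↔ pvSat a cs) := by
  have hlen : (PySem.List.pySetD a q0.1 1).length = a.length := PySem.List.length_pySetD a q0.1 1
  obtain ⟨hq00, hq01⟩ := hw q0 hq0
  constructor
  · rintro ⟨a', ⟨hl, hb', hm⟩, hall⟩
    refine ⟨a', ⟨by rw [hl, hlen], hb', ?_⟩, hall⟩
    intro i hi0 hi1 hv
    apply hm i hi0 (by rw [hlen]; exact hi1)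
    rw [pv_get_set a q0.1 i 1 hq00 hq01 hi0 hi1]
    split_ifs with he
    · rfl
    · exact hv
  · rintro ⟨a', ⟨hl, hb', hm⟩, hall⟩
    refine ⟨a', ⟨by rw [hl, hlen], hb', ?_⟩, hall⟩
    intro i hi0 hi1' hv
    rw [hlen] at hi1'
    rw [pv_get_set a q0.1 i 1 hq00 hq01 hi0 hi1'] at hv
    by_cases he : i = q0.1
    · subst he
      obtain ⟨q, hq, hval⟩ := hall c hc
      obtain ⟨hq10, hq11⟩ := hw q hq
      have hmem' : PySem.List.pyGetD a' q.1 0 ∈ a' :=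
        PySem.List.pyGetD_mem a' 0 (by simp only [PySem.Raise.InRange]; omega)
      rcases hb' _ hmem' with h0' | h1'
      · exfalso
        have haq : PySem.List.pyGetD a q.1 0 ∈ a :=
          PySem.List.pyGetD_mem a 0 (by simp only [PySem.Raise.InRange]; omega)
        rcases hb _ haq with ha0 | ha1
        · exact hns ⟨q, hq, by rw [ha0, ← hval, h0']⟩
        · have h1a : PySem.List.pyGetD a' q.1 0 = 1 := hm q.1 hq10 hq11 ha1
          rw [h1a] at h0'
          exact absurd h0' (by norm_num)
      · have hq21 : q.2 = 1 := by rw [← hval, h1']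
        have hqq0 : q = q0 := by
          refine pv_mem_len_le_one hu ?_ ?_
          · exact List.mem_filter.mpr ⟨hq, by simp [hq21]⟩
          · exact List.mem_filter.mpr ⟨hq0, by simp [h1]⟩
        rw [hqq0] at hval
        rw [hval]
        exact h1
    · rw [if_neg he] at hv
      exact hm i hi0 hi1' hv

-- ---- A's inner loop = a generic scan over the decoded pairs ----
def pvInner (a : List Int) : List (Int × Int) → Int → Bool × Int
  | [], mp => (false, mp)
  | q :: qs, mp =>
    if PySem.List.pyGetD a q.1 0 = q.2 then (true, mp)
    else if PySem.List.pyGetD a q.1 0 = 0 ∧ q.2 = 1 then pvInner a qs q.1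
    else pvInner a qs mp

def pvOdd (i : Nat) : Int := 2 * (i : Int) + 1

def pvPair (c : List Int) (i : Nat) : Int × Int :=
  (PySem.List.pyGetD c (2 * (i : Int) + 1) 0 - 1, PySem.List.pyGetD c (2 * (i : Int) + 2) 0)

theorem innerA_eq_pvInner (ans c : List Int) :
    ∀ (l : List Nat) (mp : Int),
      innerA ans c (l.map pvOdd) mp = pvInner ans (l.map (pvPair c)) mp := by
  intro l
  induction l with
  | nil => intro mp; rfl
  | cons i t ih =>
    intro mp
    simp only [List.map_cons, innerA, pvInner]
    have h2 : pvOdd i + 1 = 2 * (i : Int) + 2 := by simp [pvOdd]; ring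
    have h1 : pvOdd i = 2 * (i : Int) + 1 := rfl
    rw [h2, h1]
    simp only [pvPair]
    split_ifs with hA hB
    · rfl
    · exact ih _
    · exact ih _

theorem pvRange_odd (k : Int) :
    PySem.List.pyRange 1 (k * 2) 2 = (List.range k.toNat).map pvOdd := by
  rw [PySem.List.pyRange_of_pos 1 (k * 2) (by norm_num)]
  have hif : (if (1 : Int) < k * 2 then ((k * 2 - 1 + 2 - 1) / 2).toNat else 0) = k.toNat := by
    split_ifs with h
    · have h1 : (k * 2 - 1 + 2 - 1) = k * 2 := by ring
      rw [h1]
      have h2 : k * 2 / 2 = k := by omega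
      rw [h2]
    · omega
  rw [hif]
  apply List.map_congr_left
  intro i _
  simp [pvOdd]
  ring

theorem pvDecode_eq (c : List Int) :
    pvDecode c = (List.range (PySem.List.pyGetD c 0 0).toNat).map (pvPair c) := by
  unfold pvDecode
  rw [PySem.List.pyRange_zero, List.map_map]
  rfl

theorem innerA_decode (ans c : List Int) (mp : Int) :
    innerA ans c (PySem.List.pyRange 1 (PySem.List.pyGetD c 0 0 * 2) 2) mp =
      pvInner ans (pvDecode c) mp := by
  rw [pvRange_odd, pvDecode_eq]
  exact innerA_eq_pvInner ans c _ mp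

theorem pvInner_fst (a : List Int) :
    ∀ (qs : List (Int × Int)) (mp : Int),
      (pvInner a qs mp).1 = qs.any (fun q => PySem.List.pyGetD a q.1 0 == q.2) := by
  intro qs
  induction qs with
  | nil => intro mp; rfl
  | cons q t ih =>
    intro mp
    simp only [pvInner, List.any_cons]
    split_ifs with hA hB
    · simp [hA]
    · simp [ih, hA]
    · simp [ih, hA]

theorem pvInner_nomatch (a : List Int) :
    ∀ (qs : List (Int × Int)) (mp : Int), (∀ q ∈ qs, PySem.List.pyGetD a q.1 0 ≠ q.2) →
      pvInner a qs mp =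
        (false, qs.foldl (fun acc q =>
          if PySem.List.pyGetD a q.1 0 = 0 ∧ q.2 = 1 then q.1 else acc) mp) := by
  intro qs
  induction qs with
  | nil => intro mp _; rfl
  | cons q t ih =>
    intro mp hno
    simp only [pvInner, List.foldl_cons]
    rw [if_neg (hno q (List.mem_cons_self))]
    split_ifs with hB <;>
      exact ih _ (fun x hx => hno x (List.mem_cons_of_mem q hx))

theorem pv_foldl_last (a : List Int) :
    ∀ (qs : List (Int × Int)) (mp : Int),
      qs.foldl (fun acc q => if PySem.List.pyGetD a q.1 0 = 0 ∧ q.2 = 1 then q.1 else acc) mp =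
        (((qs.filter (fun q => decide (PySem.List.pyGetD a q.1 0 = 0) && (q.2 == 1))).map (·.1)).getLastD mp) := by
  intro qs
  induction qs with
  | nil => intro mp; rfl
  | cons q t ih =>
    intro mp
    simp only [List.foldl_cons, List.filter_cons]
    by_cases hB : PySem.List.pyGetD a q.1 0 = 0 ∧ q.2 = 1
    · rw [if_pos hB, ih]
      have hbool : (decide (PySem.List.pyGetD a q.1 0 = 0) && (q.2 == 1)) = true := by
        simp [hB.1, hB.2]
      rw [if_pos hbool, List.map_cons, List.getLastD_cons]
    · rw [if_neg hB, ih]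
      have hbool : ¬ ((decide (PySem.List.pyGetD a q.1 0 = 0) && (q.2 == 1)) = true) := by
        simpa using hB
      rw [if_neg hbool]

-- ---- A's main loop computes satisfiability ----
theorem pv_any_iff (a : List Int) (qs : List (Int × Int)) :
    (qs.any (fun q => PySem.List.pyGetD a q.1 0 == q.2) = true) ↔
      ∃ q ∈ qs, PySem.List.pyGetD a q.1 0 = q.2 := by
  simp [List.any_eq_true]

theorem pv_filter_fp_len (a c : List Int)
    (hu : ((pvDecode c).filter (fun q => q.2 == 1)).length ≤ 1) :
    ((pvDecode c).filter (fun q => decide (PySem.List.pyGetD a q.1 0 = 0) && (q.2 == 1))).length ≤ 1 := by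
  calc ((pvDecode c).filter (fun q => decide (PySem.List.pyGetD a q.1 0 = 0) && (q.2 == 1))).length
      ≤ ((pvDecode c).filter (fun q => q.2 == 1)).length := by
        rw [← List.countP_eq_length_filter, ← List.countP_eq_length_filter]
        exact List.countP_mono_left (fun q _ h => by
          simp only [Bool.and_eq_true] at h
          exact h.2)
    _ ≤ 1 := hu

-- one full scan of A: characterisation of the first-unsatisfied-customer step
theorem serveAuxA_iff (customers : List (List Int)) :
    ∀ (fuel : Nat) (ans : List Int) (done rest : List (List Int)),
      customers = done ++ rest →
      pvBin ans →
      (∀ c ∈ customers, pvWfC (ans.length : Int) c) →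
      (∀ c ∈ done, pvSatC ans c) →
      ans.count 0 < fuel →
      (serveAuxA fuel ans customers rest = true ↔ pvSat ans customers) := by
  intro fuel
  induction fuel with
  | zero => intro ans done rest _ _ _ _ hz; omega
  | succ f ihf =>
    intro ans done rest
    induction rest generalizing done with
    | nil =>
      intro hsplit hb hw hdone hz
      simp only [serveAuxA]
      constructor
      · intro _
        refine ⟨ans, pvExt_refl ans hb, ?_⟩
        rw [hsplit]
        simpa using hdone
      · intro _; trivial
    | cons c rest' ihr =>
      intro hsplit hb hw hdone hz
      have hcmem : c ∈ customers := by rw [hsplit]; simp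
      obtain ⟨hwb, hwu⟩ := hw c hcmem
      rw [serveAuxA]
      rw [innerA_decode]
      by_cases hS : pvSatC ans c
      · have hfst : (pvInner ans (pvDecode c) (-1)).1 = true := by
          rw [pvInner_fst]
          exact (pv_any_iff ans (pvDecode c)).mpr hS
        rw [if_pos hfst]
        exact ihr (done ++ [c]) (by rw [hsplit, List.append_assoc]; rfl)
          hb hw
          (by intro c' hc'
              rcases List.mem_append.mp hc' with h | h
              · exact hdone c' h
              · simp at h; rw [h]; exact hS)
          hz
      · have hno : ∀ q ∈ pvDecode c, PySem.List.pyGetD ans q.1 0 ≠ q.2 := by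
          intro q hq h
          exact hS ⟨q, hq, h⟩
        have hr : pvInner ans (pvDecode c) (-1) =
            (false, (((pvDecode c).filter
              (fun q => decide (PySem.List.pyGetD ans q.1 0 = 0) && (q.2 == 1))).map (·.1)).getLastD (-1)) := by
          rw [pvInner_nomatch ans (pvDecode c) (-1) hno, pv_foldl_last]
        rw [hr]
        rcases hflist : (pvDecode c).filter
            (fun q => decide (PySem.List.pyGetD ans q.1 0 = 0) && (q.2 == 1)) with _ | ⟨q0, ftail⟩
        · -- no flippable pair: A returns False, and the instance is unsatisfiable
          simp only [hflist, List.map_nil, List.getLastD_nil]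
          norm_num
          rintro ⟨a', hext, hall⟩
          have hnf : ∀ q ∈ pvDecode c, ¬ pvFp ans q := by
            intro q hq hfp
            have : q ∈ (pvDecode c).filter
                (fun q => decide (PySem.List.pyGetD ans q.1 0 = 0) && (q.2 == 1)) :=
              List.mem_filter.mpr ⟨hq, by simp [hfp.1, hfp.2]⟩
            rw [hflist] at this
            simp at this
          exact pvStuck ans c hb hwb hS hnf a' hext (hall c hcmem)
        · -- flip the recorded malted position and restart
          have htail : ftail = [] := by
            have := pv_filter_fp_len ans c hwu
            rw [hflist] at this
            simp at this
            exact this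
          subst htail
          have hq0 : q0 ∈ pvDecode c ∧
              (decide (PySem.List.pyGetD ans q0.1 0 = 0) && (q0.2 == 1)) = true := by
            have : q0 ∈ (pvDecode c).filter
                (fun q => decide (PySem.List.pyGetD ans q.1 0 = 0) && (q.2 == 1)) := by
              rw [hflist]; simp
            exact ⟨(List.mem_filter.mp this).1, (List.mem_filter.mp this).2⟩
          obtain ⟨hq0m, hq0b⟩ := hq0
          simp only [Bool.and_eq_true, decide_eq_true_eq, beq_iff_eq] at hq0b
          obtain ⟨hfz, hfo⟩ := hq0b
          obtain ⟨hb0, hb1⟩ := hwb q0 hq0m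
          rw [hflist]
          simp only [List.map_cons, List.map_nil, List.getLastD_cons, List.getLastD_nil]
          rw [if_neg Bool.false_ne_true]
          have hne : q0.1 ≠ -1 := by omega
          rw [if_pos hne]
          have hrec := ihf (PySem.List.pySetD ans q0.1 1) [] customers rfl
            (pvBin_set ans q0.1 hb0 hb)
            (by intro c' hc'
                rw [PySem.List.length_pySetD]
                exact hw c' hc')
            (by intro c' hc'; simp at hc')
            (by have := pv_count_set_lt ans q0.1 hb0 hb1 hfz; omega)
          rw [hrec]
          exact pvFlip ans c customers q0 hb hcmem hwb hwu hS hq0m hfz hfo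

-- ---- B's incremental index: one decode step ----
theorem pvIdxFold_getD (ps : List (Int × Int)) (index : PySem.Dict Int (List Int)) (ci f : Int) :
    (ps.foldl (fun d q => d.modify q.1 [] (fun l => l ++ [ci])) index).getD f [] =
      index.getD f [] ++ (ps.filter (fun q => q.1 == f)).map (fun _ => ci) := by
  have h : ps.foldl (fun d q => d.modify q.1 [] (fun l => l ++ [ci])) index =
      (ps.map (fun q => (q.1, ci))).foldl (fun d p => d.modify p.1 [] (fun l => l ++ [p.2])) index := by
    rw [List.foldl_map]
  rw [h, PySem.Dict.getD_foldl_modify_append]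
  congr 1
  rw [List.filter_map, List.map_map]
  simp [Function.comp_def]

theorem pvSatB_iff (a c : List Int) : pvSatB a c = true ↔ pvSatC a c := by
  unfold pvSatB pvSatC
  simp [List.any_eq_true]

theorem pvSumEq (customers : List (List Int)) :
    customers.map (fun c => (PySem.List.pyGetD c 0 0).toNat) =
      customers.map (fun c => (pvDecode c).length) := by
  apply List.map_congr_left
  intro c _
  unfold pvDecode
  rw [List.length_map, PySem.List.length_pyRange_one]
  omega

theorem pvFlipableB_iff (a c : List Int) :
    pvFlipableB a c = true ↔ ∃ q ∈ pvDecode c, PySem.List.pyGetD a q.1 0 = 0 ∧ q.2 = 1 := by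
  unfold pvFlipableB
  simp [List.any_eq_true]

theorem pvPrefsSum (customers : List (List Int)) (prefs : PySem.Dict Int (List (Int × Int)))
    (hnd : prefs.keys.Nodup)
    (h1 : ∀ ci ps, prefs.get? ci = some ps → ∃ k : Nat, k < customers.length ∧ ci = (k : Int) ∧
      ps = pvDecode (customers.getD k [])) :
    (prefs.values.map List.length).sum ≤ (customers.map (fun c => (pvDecode c).length)).sum := by
  -- each item of the dict is (cast k, pvDecode c_k) for a distinct k < length
  have hitems : ∀ p ∈ prefs.items, ∃ k : Nat, k < customers.length ∧ p.1 = (k : Int) ∧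
      p.2 = pvDecode (customers.getD k []) := by
    intro p hp
    have := PySem.Dict.get?_of_mem_items (d := prefs) (k := p.1) (v := p.2) (by simpa using hp) hnd
    obtain ⟨k, hk, hik, hps⟩ := h1 p.1 p.2 this
    exact ⟨k, hk, hik, hps⟩
  -- the Nat ids of the items
  have hvals : prefs.values.map List.length =
      (prefs.items.map (fun p => p.1.toNat)).map
        (fun k => (pvDecode (customers.getD k [])).length) := by
    have : prefs.values = prefs.items.map (fun p => p.2) := rfl
    rw [this, List.map_map, List.map_map]
    apply List.map_congr_left
    intro p hp
    obtain ⟨k, hk, hik, hps⟩ := hitems p hp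
    simp [hps, hik]
  rw [hvals]
  set L := prefs.items.map (fun p => p.1.toNat) with hL
  have hLnd : L.Nodup := by
    have hkeys : prefs.keys = prefs.items.map (fun p => p.1) := rfl
    rw [hkeys] at hnd
    rw [hL]
    have : prefs.items.map (fun p => p.1.toNat) =
        (prefs.items.map (fun p => p.1)).map Int.toNat := by rw [List.map_map]; rfl
    rw [this]
    refine List.Nodup.map_on ?_ hnd
    intro x hx y hy hxy
    obtain ⟨p, hp, hpx⟩ := List.mem_map.mp hx
    obtain ⟨p', hp', hpy⟩ := List.mem_map.mp hy
    obtain ⟨k, _, hik, _⟩ := hitems p hp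
    obtain ⟨k', _, hik', _⟩ := hitems p' hp'
    rw [← hpx, ← hpy, hik, hik'] at hxy ⊢
    simp at hxy
    rw [hxy]
  have hLsub : L ⊆ List.range customers.length := by
    intro x hx
    rw [hL] at hx
    obtain ⟨p, hp, hpx⟩ := List.mem_map.mp hx
    obtain ⟨k, hk, hik, _⟩ := hitems p hp
    rw [List.mem_range]
    rw [← hpx, hik]
    simpa using hk
  have hsub : L.Subperm (List.range customers.length) := List.subperm_of_subset hLnd hLsub
  have hfinal : ((List.range customers.length).map
      (fun k => (pvDecode (customers.getD k [])).length)).sum =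
      (customers.map (fun c => (pvDecode c).length)).sum := by
    congr 1
    apply List.ext_getElem (by simp)
    intro i h1 h2
    have hi : i < customers.length := by simpa using h2
    simp [List.getD_eq_getElem?_getD, List.getElem?_eq_getElem hi]
  rw [← hfinal]
  obtain ⟨m, hperm, hsl⟩ := hsub
  calc (L.map (fun k => (pvDecode (customers.getD k [])).length)).sum
      = (m.map (fun k => (pvDecode (customers.getD k [])).length)).sum :=
        ((hperm.map (fun k => (pvDecode (customers.getD k [])).length)).sum_eq).symm
    _ ≤ _ := (hsl.map (fun k => (pvDecode (customers.getD k [])).length)).sum_le_sum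
        (by intro x _; omega)

-- ---- B's worklist loop computes satisfiability (wellformed instances) ----
theorem pvGetD_cust (customers : List (List Int)) (ci : Int) (hci0 : 0 ≤ ci)
    (hcit : ci.toNat < customers.length) :
    PySem.List.pyGetD customers ci [] = customers.getD ci.toNat [] := by
  rw [PySem.List.pyGetD_eq_getElem _ _ hci0 (by omega), List.getD_eq_getElem customers [] hcit]

theorem pvStep_facts (customers : List (List Int)) (prefs : PySem.Dict Int (List (Int × Int)))
    (index : PySem.Dict Int (List Int)) (ci : Int)
    (hci0 : 0 ≤ ci) (hcit : ci.toNat < customers.length)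
    (hnd : prefs.keys.Nodup)
    (h1 : ∀ ci' ps', prefs.get? ci' = some ps' → ∃ k : Nat, k < customers.length ∧ ci' = (k : Int) ∧
      ps' = pvDecode (customers.getD k []))
    (h2a : ∀ ci' ps' q, prefs.get? ci' = some ps' → q ∈ ps' → ci' ∈ index.getD q.1 [])
    (h2b : ∀ f x, x ∈ index.getD f [] → ∃ ps', prefs.get? x = some ps' ∧ ∃ q ∈ ps', q.1 = f)
    (hidx : ∀ f, (index.getD f []).length ≤ (prefs.values.map List.length).sum) :
    (pvDecodeStep customers prefs index ci).1 = pvDecode (customers.getD ci.toNat []) ∧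
    (pvDecodeStep customers prefs index ci).2.1.keys.Nodup ∧
    (∀ ci' ps', (pvDecodeStep customers prefs index ci).2.1.get? ci' = some ps' →
      ∃ k : Nat, k < customers.length ∧ ci' = (k : Int) ∧ ps' = pvDecode (customers.getD k [])) ∧
    (∀ ci' ps' q, (pvDecodeStep customers prefs index ci).2.1.get? ci' = some ps' → q ∈ ps' →
      ci' ∈ (pvDecodeStep customers prefs index ci).2.2.getD q.1 []) ∧
    (∀ f x, x ∈ (pvDecodeStep customers prefs index ci).2.2.getD f [] →
      ∃ ps', (pvDecodeStep customers prefs index ci).2.1.get? x = some ps' ∧ ∃ q ∈ ps', q.1 = f) ∧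
    (∀ f, ((pvDecodeStep customers prefs index ci).2.2.getD f []).length ≤
      ((pvDecodeStep customers prefs index ci).2.1.values.map List.length).sum) ∧
    (∀ k : Int, prefs.contains k = true → (pvDecodeStep customers prefs index ci).2.1.contains k = true) ∧
    (pvDecodeStep customers prefs index ci).2.1.contains ci = true := by
  rcases hget : prefs.get? ci with _ | ps0
  · -- miss: decode, insert, extend the index
    have hgd := pvGetD_cust customers ci hci0 hcit
    have hstep : pvDecodeStep customers prefs index ci =
        (pvDecode (customers.getD ci.toNat []),
         prefs.insert ci (pvDecode (customers.getD ci.toNat [])),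
         (pvDecode (customers.getD ci.toNat [])).foldl
           (fun d q => d.modify q.1 [] (fun l => l ++ [ci])) index) := by
      unfold pvDecodeStep
      rw [hget, hgd]
    rw [hstep]
    have hcontf : prefs.contains ci = false := by
      rw [PySem.Dict.contains_eq_isSome_get?, hget]
      rfl
    have hvals : ((prefs.insert ci (pvDecode (customers.getD ci.toNat []))).values.map List.length).sum =
        (prefs.values.map List.length).sum + (pvDecode (customers.getD ci.toNat [])).length := by
      have hit := PySem.Dict.items_insert_of_not_contains prefs
        (pvDecode (customers.getD ci.toNat [])) hcontf
      have : (prefs.insert ci (pvDecode (customers.getD ci.toNat []))).values =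
          prefs.values ++ [pvDecode (customers.getD ci.toNat [])] := by
        show (prefs.insert ci (pvDecode (customers.getD ci.toNat []))).items.map (·.2) = _
        rw [hit, List.map_append]
        rfl
      rw [this, List.map_append, List.sum_append]
      rfl
    refine ⟨rfl, PySem.Dict.nodup_keys_insert prefs ci _ hnd, ?_, ?_, ?_, ?_, ?_, ?_⟩
    · intro ci' ps' hg
      by_cases he : ci' = ci
      · subst he
        rw [PySem.Dict.get?_insert_self] at hg
        exact ⟨ci'.toNat, hcit, by omega, by injection hg with h; rw [← h]⟩
      · rw [PySem.Dict.get?_insert_of_ne _ _ he] at hg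
        exact h1 ci' ps' hg
    · intro ci' ps' q hg hq
      rw [pvIdxFold_getD]
      by_cases he : ci' = ci
      · subst he
        rw [PySem.Dict.get?_insert_self] at hg
        injection hg with h
        subst h
        apply List.mem_append.mpr
        right
        exact List.mem_map.mpr ⟨q, List.mem_filter.mpr ⟨hq, by simp⟩, rfl⟩
      · rw [PySem.Dict.get?_insert_of_ne _ _ he] at hg
        exact List.mem_append.mpr (Or.inl (h2a ci' ps' q hg hq))
    · intro f x hx
      rw [pvIdxFold_getD] at hx
      rcases List.mem_append.mp hx with h | h
      · obtain ⟨ps', hg, hqq⟩ := h2b f x h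
        have hne : x ≠ ci := by
          intro he
          rw [he, hget] at hg
          simp at hg
        exact ⟨ps', by rw [PySem.Dict.get?_insert_of_ne _ _ hne]; exact hg, hqq⟩
      · obtain ⟨q, hqf, hxq⟩ := List.mem_map.mp h
        refine ⟨pvDecode (customers.getD ci.toNat []), by rw [← hxq, PySem.Dict.get?_insert_self], ?_⟩
        obtain ⟨hqm, hqb⟩ := List.mem_filter.mp hqf
        exact ⟨q, hqm, by simpa using hqb⟩
    · intro f
      rw [pvIdxFold_getD, List.length_append, List.length_map, hvals]
      have h1l := hidx f
      have h2l : ((pvDecode (customers.getD ci.toNat [])).filter (fun q => q.1 == f)).length ≤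
          (pvDecode (customers.getD ci.toNat [])).length := List.length_filter_le _ _
      omega
    · intro k hk
      rw [PySem.Dict.contains_insert]
      simp [hk]
    · exact PySem.Dict.contains_insert_self prefs ci _
  · -- hit: everything is unchanged
    have hstep : pvDecodeStep customers prefs index ci = (ps0, prefs, index) := by
      unfold pvDecodeStep
      rw [hget]
    rw [hstep]
    obtain ⟨k, hk, hik, hps⟩ := h1 ci ps0 hget
    have hkk : k = ci.toNat := by omega
    refine ⟨by rw [hps, hkk], hnd, h1, h2a, h2b, hidx, fun _ h => h, ?_⟩
    rw [PySem.Dict.contains_eq_isSome_get?, hget]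
    rfl

theorem pvLoopB_iff (customers : List (List Int)) :
    ∀ (fuel : Nat) (ans : List Int) (pending : List Int)
      (prefs : PySem.Dict Int (List (Int × Int))) (index : PySem.Dict Int (List Int)),
      pvBin ans →
      (∀ c ∈ customers, pvWfC (ans.length : Int) c) →
      (∀ ci ∈ pending, 0 ≤ ci ∧ ci < (customers.length : Int)) →
      prefs.keys.Nodup →
      (∀ ci ps, prefs.get? ci = some ps → ∃ k : Nat, k < customers.length ∧ ci = (k : Int) ∧
        ps = pvDecode (customers.getD k [])) →
      (∀ ci ps q, prefs.get? ci = some ps → q ∈ ps → ci ∈ index.getD q.1 []) →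
      (∀ f x, x ∈ index.getD f [] → ∃ ps, prefs.get? x = some ps ∧ ∃ q ∈ ps, q.1 = f) →
      (∀ f, (index.getD f []).length ≤ (prefs.values.map List.length).sum) →
      (∀ k : Nat, k < customers.length → ((k : Int)) ∉ pending →
        prefs.contains (k : Int) = true ∧ pvSatC ans (customers.getD k [])) →
      pending.length + (ans.count 0) * ((customers.map (fun c => (pvDecode c).length)).sum + customers.length + 1) < fuel →
      (pvLoopB customers fuel ans pending prefs index = true ↔ pvSat ans customers) := by
  intro fuel
  induction fuel with
  | zero => intro ans pending prefs index _ _ _ _ _ _ _ _ _ hfuel; omega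
  | succ f ih =>
    intro ans pending prefs index hb hw hpend hnd h1 h2a h2b hidx hinv hfuel
    cases pending with
    | nil =>
      constructor
      · intro _
        refine ⟨ans, pvExt_refl ans hb, ?_⟩
        intro c hc
        obtain ⟨k, hk, hck⟩ := List.mem_iff_getElem.mp hc
        have := (hinv k hk (by simp)).2
        rwa [List.getD_eq_getElem customers [] hk, hck] at this
      · intro _; rfl
    | cons ci rest =>
      obtain ⟨hci0, hciF⟩ := hpend ci List.mem_cons_self
      have hcit : ci.toNat < customers.length := by omega
      have hcmem : customers.getD ci.toNat [] ∈ customers := by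
        rw [List.getD_eq_getElem customers [] hcit]
        exact List.getElem_mem hcit
      obtain ⟨hwb, hwu⟩ := hw _ hcmem
      obtain ⟨hr1, hnd', h1', h2a', h2b', hidx', hmono, hcic⟩ :=
        pvStep_facts customers prefs index ci hci0 hcit hnd h1 h2a h2b hidx
      have hVS : ((pvDecodeStep customers prefs index ci).2.1.values.map List.length).sum ≤
          (customers.map (fun c => (pvDecode c).length)).sum :=
        pvPrefsSum customers _ hnd' h1'
      simp only [pvLoopB]
      rw [hr1]
      by_cases hS : pvSatC ans (customers.getD ci.toNat [])
      · rw [if_pos ((pv_any_iff ans _).mpr hS)]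
        apply ih ans rest _ _ hb hw
          (fun x hx => hpend x (List.mem_cons_of_mem ci hx))
          hnd' h1' h2a' h2b' hidx' ?_
          (by simp only [List.length_cons] at hfuel; omega)
        intro k hk hknr
        by_cases hkci : ((k : Int)) = ci
        · refine ⟨by rw [hkci]; exact hcic, ?_⟩
          have : ci.toNat = k := by omega
          rw [← this]
          exact hS
        · have := hinv k hk (by simp [hkci, hknr])
          exact ⟨hmono _ this.1, this.2⟩
      · rw [if_neg (by
          intro hany
          exact hS ((pv_any_iff ans _).mp hany))]
        cases hfind : (pvDecode (customers.getD ci.toNat [])).find?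
            (fun q => PySem.List.pyGetD ans q.1 0 == 0 && q.2 == 1) with
        | none =>
          norm_num
          rintro ⟨a', hext, hall⟩
          have hnf : ∀ q ∈ pvDecode (customers.getD ci.toNat []), ¬ pvFp ans q := by
            intro q hq hfp
            have := List.find?_eq_none.mp hfind q hq
            simp only [Bool.and_eq_true, beq_iff_eq] at this
            exact this ⟨hfp.1, hfp.2⟩
          exact pvStuck ans (customers.getD ci.toNat []) hb hwb hS hnf a' hext
            (hall (customers.getD ci.toNat []) hcmem)
        | some q0 =>
          have hq0m : q0 ∈ pvDecode (customers.getD ci.toNat []) :=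
            List.mem_of_find?_eq_some hfind
          have hq0p := List.find?_some hfind
          simp only [Bool.and_eq_true, beq_iff_eq] at hq0p
          obtain ⟨hfz, hfo⟩ := hq0p
          obtain ⟨hb0, hb1⟩ := hwb q0 hq0m
          have hlen : (PySem.List.pySetD ans q0.1 1).length = ans.length :=
            PySem.List.length_pySetD ans q0.1 1
          have hzlt := pv_count_set_lt ans q0.1 hb0 hb1 hfz
          -- ci is (now) indexed under q0.1
          have hciidx : ci ∈ (pvDecodeStep customers prefs index ci).2.2.getD q0.1 [] := by
            apply h2a' ci (pvDecode (customers.getD ci.toNat [])) q0 ?_ hq0m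
            rcases hg : (pvDecodeStep customers prefs index ci).2.1.get? ci with _ | ps'
            · exfalso
              have : (pvDecodeStep customers prefs index ci).2.1.contains ci = true := hcic
              rw [PySem.Dict.contains_eq_isSome_get?, hg] at this
              exact Bool.noConfusion this
            · obtain ⟨k, hk, hik, hps⟩ := h1' ci ps' hg
              have : k = ci.toNat := by omega
              rw [hps, this]
          apply Iff.trans
            (ih (PySem.List.pySetD ans q0.1 1)
              (rest ++ (pvDecodeStep customers prefs index ci).2.2.getD q0.1 []) _ _
              (pvBin_set ans q0.1 hb0 hb)
              (by intro c' hc'; rw [hlen]; exact hw c' hc')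
              ?_ hnd' h1' h2a' h2b' hidx' ?_ ?_)
          · exact pvFlip ans (customers.getD ci.toNat []) customers q0 hb hcmem hwb hwu hS
              hq0m hfz hfo
          · -- pending elements in range
            intro x hx
            rcases List.mem_append.mp hx with h | h
            · exact hpend x (List.mem_cons_of_mem ci h)
            · obtain ⟨ps', hg, _⟩ := h2b' q0.1 x h
              obtain ⟨k, hk, hik, _⟩ := h1' x ps' hg
              constructor <;> omega
          · -- invariant
            intro k hk hknot
            have hknr : ((k : Int)) ∉ rest ∧
                ((k : Int)) ∉ (pvDecodeStep customers prefs index ci).2.2.getD q0.1 [] :=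
              ⟨fun h => hknot (List.mem_append.mpr (Or.inl h)),
               fun h => hknot (List.mem_append.mpr (Or.inr h))⟩
            by_cases hkci : ((k : Int)) = ci
            · exfalso
              apply hknr.2
              rw [hkci]
              exact hciidx
            · have hold := hinv k hk (by simp [hkci, hknr.1])
              refine ⟨hmono _ hold.1, ?_⟩
              obtain ⟨q, hq, hval⟩ := hold.2
              obtain ⟨hqb0, hqb1⟩ := (hw (customers.getD k []) (by
                rw [List.getD_eq_getElem customers [] hk]
                exact List.getElem_mem hk)).1 q hq
              by_cases hqf : q.1 = q0.1
              · exfalso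
                apply hknr.2
                rw [← hqf]
                apply h2a' (k : Int) (pvDecode (customers.getD k [])) q ?_ hq
                rcases hg : (pvDecodeStep customers prefs index ci).2.1.get? (k : Int) with _ | ps'
                · exfalso
                  have := hmono _ hold.1
                  rw [PySem.Dict.contains_eq_isSome_get?, hg] at this
                  exact Bool.noConfusion this
                · obtain ⟨k', hk', hik', hps'⟩ := h1' (k : Int) ps' hg
                  have : k' = k := by omega
                  rw [hps', this]
              · refine ⟨q, hq, ?_⟩
                rw [pv_get_set ans q0.1 q.1 1 hb0 hb1 hqb0 hqb1, if_neg hqf]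
                exact hval
          · -- fuel
            rw [List.length_append]
            have hidxlen : (((pvDecodeStep customers prefs index ci).2.2.getD q0.1 []).length ≤
                (customers.map (fun c => (pvDecode c).length)).sum) :=
              le_trans (hidx' q0.1) hVS
            have h1r : ((PySem.List.pySetD ans q0.1 1).count 0 + 1) *
                  ((customers.map (fun c => (pvDecode c).length)).sum + customers.length + 1) =
                (PySem.List.pySetD ans q0.1 1).count 0 *
                  ((customers.map (fun c => (pvDecode c).length)).sum + customers.length + 1) +
                ((customers.map (fun c => (pvDecode c).length)).sum + customers.length + 1) := by
              ring
            have hmul : (PySem.List.pySetD ans q0.1 1).count 0 *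
                  ((customers.map (fun c => (pvDecode c).length)).sum + customers.length + 1) +
                ((customers.map (fun c => (pvDecode c).length)).sum + customers.length + 1) ≤
                ans.count 0 *
                  ((customers.map (fun c => (pvDecode c).length)).sum + customers.length + 1) := by
              rw [← h1r]
              exact Nat.mul_le_mul_right _ (by omega)
            simp only [List.length_cons] at hfuel
            omega

-- ---- the no-flip first pass (both versions, junk tails allowed) ----
def pvDeadC (a c : List Int) : Prop :=
  (¬ pvSatC a c) ∧ ∀ q ∈ pvDecode c, ¬ (PySem.List.pyGetD a q.1 0 = 0 ∧ q.2 = 1)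

theorem serveAuxA_pass_true (ans : List Int) (customers : List (List Int)) :
    ∀ (rest : List (List Int)) (fuel : Nat), (∀ c ∈ rest, pvSatC ans c) →
      serveAuxA fuel ans customers rest = true := by
  intro rest
  induction rest with
  | nil => intro fuel _; simp [serveAuxA]
  | cons c rest' ih =>
    intro fuel hsat
    have hfst : (pvInner ans (pvDecode c) (-1)).1 = true := by
      rw [pvInner_fst]
      exact (pv_any_iff ans (pvDecode c)).mpr (hsat c List.mem_cons_self)
    cases fuel with
    | zero =>
      rw [serveAuxA, innerA_decode, if_pos hfst]
      exact ih 0 (fun c' hc' => hsat c' (List.mem_cons_of_mem c hc'))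
    | succ f =>
      rw [serveAuxA, innerA_decode, if_pos hfst]
      exact ih (f + 1) (fun c' hc' => hsat c' (List.mem_cons_of_mem c hc'))

theorem serveAuxA_pass_false (ans : List Int) (customers : List (List Int)) :
    ∀ (r1 : List (List Int)) (c : List Int) (r2 : List (List Int)) (fuel : Nat),
      (∀ c' ∈ r1, pvSatC ans c') → pvDeadC ans c →
      serveAuxA fuel ans customers (r1 ++ c :: r2) = false := by
  intro r1
  induction r1 with
  | nil =>
    intro c r2 fuel _ hdead
    obtain ⟨hns, hnf⟩ := hdead
    have hno : ∀ q ∈ pvDecode c, PySem.List.pyGetD ans q.1 0 ≠ q.2 := by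
      intro q hq h
      exact hns ⟨q, hq, h⟩
    have hflist : (pvDecode c).filter
        (fun q => decide (PySem.List.pyGetD ans q.1 0 = 0) && (q.2 == 1)) = [] := by
      rw [List.filter_eq_nil_iff]
      intro q hq
      simp only [Bool.and_eq_true, decide_eq_true_eq, beq_iff_eq, not_and]
      intro h1 h2
      exact hnf q hq ⟨h1, h2⟩
    cases fuel with
    | zero =>
      rw [List.nil_append, serveAuxA, innerA_decode,
        pvInner_nomatch ans (pvDecode c) (-1) hno, pv_foldl_last, hflist]
      simp
    | succ f =>
      rw [List.nil_append, serveAuxA, innerA_decode,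
        pvInner_nomatch ans (pvDecode c) (-1) hno, pv_foldl_last, hflist]
      simp
  | cons c1 r1' ih =>
    intro c r2 fuel hsat hdead
    have hfst : (pvInner ans (pvDecode c1) (-1)).1 = true := by
      rw [pvInner_fst]
      exact (pv_any_iff ans (pvDecode c1)).mpr (hsat c1 List.mem_cons_self)
    cases fuel with
    | zero =>
      rw [List.cons_append, serveAuxA, innerA_decode, if_pos hfst]
      exact ih c r2 0 (fun c' hc' => hsat c' (List.mem_cons_of_mem c1 hc')) hdead
    | succ f =>
      rw [List.cons_append, serveAuxA, innerA_decode, if_pos hfst]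
      exact ih c r2 (f + 1) (fun c' hc' => hsat c' (List.mem_cons_of_mem c1 hc')) hdead

theorem pvLoopB_pass_true (ans : List Int) (customers : List (List Int)) :
    ∀ (pending : List Int) (fuel : Nat) (prefs : PySem.Dict Int (List (Int × Int)))
      (index : PySem.Dict Int (List Int)),
      pending.Nodup → (∀ y ∈ pending, prefs.get? y = none) →
      (∀ y ∈ pending, pvSatC ans (PySem.List.pyGetD customers y [])) →
      pending.length < fuel →
      pvLoopB customers fuel ans pending prefs index = true := by
  intro pending
  induction pending with
  | nil =>
    intro fuel prefs index _ _ _ _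
    cases fuel <;> rfl
  | cons y rest ih =>
    intro fuel prefs index hnd hfresh hsat hf
    cases fuel with
    | zero => simp at hf
    | succ f =>
      have hmiss : prefs.get? y = none := hfresh y List.mem_cons_self
      have hstep : pvDecodeStep customers prefs index y =
          (pvDecode (PySem.List.pyGetD customers y []),
           prefs.insert y (pvDecode (PySem.List.pyGetD customers y [])),
           (pvDecode (PySem.List.pyGetD customers y [])).foldl
             (fun d q => d.modify q.1 [] (fun l => l ++ [y])) index) := by
        unfold pvDecodeStep
        rw [hmiss]
      rw [pvLoopB]
      simp only [hstep]
      rw [if_pos ((pv_any_iff ans _).mpr (hsat y List.mem_cons_self))]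
      apply ih f _ _ (List.Nodup.of_cons hnd)
      · intro x hx
        rw [PySem.Dict.get?_insert_of_ne _ _ (by
          intro h
          rw [h] at hx
          exact (List.nodup_cons.mp hnd).1 hx)]
        exact hfresh x (List.mem_cons_of_mem y hx)
      · intro x hx
        exact hsat x (List.mem_cons_of_mem y hx)
      · simp at hf
        omega

theorem pvLoopB_pass_false (ans : List Int) (customers : List (List Int)) :
    ∀ (p1 : List Int) (x : Int) (p2 : List Int) (fuel : Nat)
      (prefs : PySem.Dict Int (List (Int × Int))) (index : PySem.Dict Int (List Int)),
      (p1 ++ x :: p2).Nodup → (∀ y ∈ p1 ++ x :: p2, prefs.get? y = none) →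
      (∀ y ∈ p1, pvSatC ans (PySem.List.pyGetD customers y [])) →
      pvDeadC ans (PySem.List.pyGetD customers x []) →
      p1.length < fuel →
      pvLoopB customers fuel ans (p1 ++ x :: p2) prefs index = false := by
  intro p1
  induction p1 with
  | nil =>
    intro x p2 fuel prefs index hnd hfresh _ hdead hf
    cases fuel with
    | zero => simp at hf
    | succ f =>
      have hmiss : prefs.get? x = none := hfresh x (by simp)
      have hstep : pvDecodeStep customers prefs index x =
          (pvDecode (PySem.List.pyGetD customers x []),
           prefs.insert x (pvDecode (PySem.List.pyGetD customers x [])),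
           (pvDecode (PySem.List.pyGetD customers x [])).foldl
             (fun d q => d.modify q.1 [] (fun l => l ++ [x])) index) := by
        unfold pvDecodeStep
        rw [hmiss]
      rw [List.nil_append, pvLoopB]
      simp only [hstep]
      obtain ⟨hns, hnf⟩ := hdead
      rw [if_neg (by
        intro hany
        exact hns ((pv_any_iff ans _).mp hany))]
      have hfind : (pvDecode (PySem.List.pyGetD customers x [])).find?
          (fun q => PySem.List.pyGetD ans q.1 0 == 0 && q.2 == 1) = none := by
        rw [List.find?_eq_none]
        intro q hq
        simp only [Bool.and_eq_true, beq_iff_eq, not_and]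
        intro h1 h2
        exact hnf q hq ⟨h1, h2⟩
      rw [hfind]
  | cons y p1' ih =>
    intro x p2 fuel prefs index hnd hfresh hsat hdead hf
    cases fuel with
    | zero => simp at hf
    | succ f =>
      have hmiss : prefs.get? y = none := hfresh y (by simp)
      have hstep : pvDecodeStep customers prefs index y =
          (pvDecode (PySem.List.pyGetD customers y []),
           prefs.insert y (pvDecode (PySem.List.pyGetD customers y [])),
           (pvDecode (PySem.List.pyGetD customers y [])).foldl
             (fun d q => d.modify q.1 [] (fun l => l ++ [y])) index) := by
        unfold pvDecodeStep
        rw [hmiss]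
      rw [List.cons_append, pvLoopB]
      simp only [hstep]
      rw [if_pos ((pv_any_iff ans _).mpr (hsat y List.mem_cons_self))]
      have hnd' : (y :: (p1' ++ x :: p2)).Nodup := by simpa using hnd
      apply ih x p2 f _ _ hnd'.of_cons
      · intro z hz
        rw [PySem.Dict.get?_insert_of_ne _ _ (by
          intro h
          rw [h] at hz
          exact (List.nodup_cons.mp hnd').1 hz)]
        exact hfresh z (by
          rw [List.cons_append]
          exact List.mem_cons_of_mem y hz)
      · intro z hz
        exact hsat z (List.mem_cons_of_mem y hz)
      · exact hdead
      · simp at hf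
        omega

-- ---- assembling the two sides ----
theorem serve_customers_alt_iff (ans : List Int) (customers : List (List Int))
    (hb : ∀ a ∈ ans, a = 0 ∨ a = 1)
    (hw : ∀ c ∈ customers, pvWfC (ans.length : Int) c) :
    (serve_customers_alt ans customers = true ↔ pvSat ans customers) := by
  unfold serve_customers_alt
  simp only []
  rw [pvSumEq customers]
  apply pvLoopB_iff customers _ ans _ PySem.Dict.empty PySem.Dict.empty hb hw
  · -- pending elements in range
    intro x hx
    rw [PySem.List.mem_pyRange_one] at hx
    exact hx
  · exact PySem.Dict.nodup_keys_empty
  · intro ci ps h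
    rw [PySem.Dict.get?_empty] at h
    exact absurd h (by simp)
  · intro ci ps q h
    rw [PySem.Dict.get?_empty] at h
    exact absurd h (by simp)
  · intro f x h
    rw [PySem.Dict.getD_empty] at h
    exact absurd h (by simp)
  · intro f
    rw [PySem.Dict.getD_empty]
    simp
  · intro k hk hknot
    exfalso
    apply hknot
    rw [PySem.List.mem_pyRange_one]
    constructor <;> omega
  · rw [PySem.List.length_pyRange_one]
    have hF : ((customers.length : Int) - 0).toNat = customers.length := by omega
    rw [hF]
    have hring : ((customers.map (fun c => (pvDecode c).length)).sum + customers.length + 1) *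
          (ans.count 0 + 1) =
        ans.count 0 * ((customers.map (fun c => (pvDecode c).length)).sum + customers.length + 1) +
          ((customers.map (fun c => (pvDecode c).length)).sum + customers.length + 1) := by
      ring
    rw [hring]
    omega

theorem serve_customers_iff (ans : List Int) (customers : List (List Int))
    (hb : ∀ a ∈ ans, a = 0 ∨ a = 1)
    (hw : ∀ c ∈ customers, pvWfC (ans.length : Int) c) :
    (serve_customers ans customers = true ↔ pvSat ans customers) := by
  unfold serve_customers
  apply serveAuxA_iff customers (ans.length + 1) ans [] customers rfl hb hw
  · intro c hc
    simp at hc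
  · have := List.count_le_length (l := ans) (a := 0)
    omega

-- ===== VERDICT (by name: the statement is the Claim_ definition above) =====
theorem serve_customers_spec : Claim_equal_serve_customers := by
  intro ans customers _ hp
  unfold Spec_serve_customers
  rcases hp with ⟨hb, hwf⟩ | ⟨j, hj, hpre, hlast⟩
  · -- wellformed instance: both sides compute satisfiability
    have hw : ∀ c ∈ customers, pvWfC (ans.length : Int) c := by
      intro c hc
      have h := hwf c hc
      simp only [pvReadableB, Bool.and_eq_true, List.all_eq_true, decide_eq_true_eq] at h
      obtain ⟨⟨hr, hnn⟩, hu⟩ := h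
      refine ⟨?_, hu⟩
      intro q hq
      exact ⟨hnn q hq, (hr.2 q hq).2⟩
    have hA := serve_customers_iff ans customers hb hw
    have hB := serve_customers_alt_iff ans customers hb hw
    cases hA' : serve_customers ans customers <;>
      cases hB' : serve_customers_alt ans customers <;> simp_all
  · -- decided by the first scan, before any flip
    rcases hlast with hjeq | hdj
    · -- every customer is satisfied as given: both sides return True
      have hsatAll : ∀ c ∈ customers, pvSatC ans c := by
        intro c hc
        obtain ⟨k, hk, hck⟩ := List.mem_iff_getElem.mp hc
        have := hpre k (by omega)
        simp only [Bool.and_eq_true] at this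
        have := this.2
        rw [pvSatB_iff] at this
        rwa [List.getD_eq_getElem customers [] hk, hck] at this
      have hA : serve_customers ans customers = true :=
        serveAuxA_pass_true ans customers customers _ hsatAll
      have hB : serve_customers_alt ans customers = true := by
        unfold serve_customers_alt
        simp only []
        rw [pvSumEq customers]
        apply pvLoopB_pass_true
        · exact PySem.List.nodup_pyRange_one 0 (customers.length : Int)
        · intro y _
          exact PySem.Dict.get?_empty y
        · intro y hy
          rw [PySem.List.mem_pyRange_one] at hy
          have hyt : y.toNat < customers.length := by omega
          rw [pvGetD_cust customers y hy.1 hyt]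
          apply hsatAll
          rw [List.getD_eq_getElem customers [] hyt]
          exact List.getElem_mem hyt
        · rw [PySem.List.length_pyRange_one]
          have h1 : ((customers.map (fun c => (pvDecode c).length)).sum + customers.length + 1) ≤
              ((customers.map (fun c => (pvDecode c).length)).sum + customers.length + 1) *
                (ans.count 0 + 1) := Nat.le_mul_of_pos_right _ (by omega)
          omega
      rw [hA, hB]
    · -- a readable, already-satisfied prefix and then an unsatisfiable customer: both False
      obtain ⟨⟨hrd, hsb'⟩, hfb'⟩ : (pvReadableB ans (customers.getD j []) = true ∧
          (!pvSatB ans (customers.getD j [])) = true) ∧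
          (!pvFlipableB ans (customers.getD j [])) = true := by
        simpa only [Bool.and_eq_true] using hdj
      have hsb : pvSatB ans (customers.getD j []) = false := by
        simpa using hsb'
      have hfb : pvFlipableB ans (customers.getD j []) = false := by
        simpa using hfb'
      have hjlt : j < customers.length := by
        by_contra h
        have hje : j = customers.length := by omega
        rw [hje, List.getD_eq_default _ _ (by omega)] at hrd
        simp [pvReadableB] at hrd
      have hsatPre : ∀ c' ∈ customers.take j, pvSatC ans c' := by
        intro c' hc'
        obtain ⟨i, hi, hci⟩ := List.mem_iff_getElem.mp hc'
        have hij : i < j := by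
          have := hi
          simp [List.length_take] at this
          omega
        have := hpre i hij
        simp only [Bool.and_eq_true] at this
        have := this.2
        rw [pvSatB_iff] at this
        rw [List.getD_eq_getElem customers [] (by omega)] at this
        rw [← hci, List.getElem_take]
        exact this
      have hgj : customers.getD j [] = customers[j] := List.getD_eq_getElem customers [] hjlt
      have hdead : pvDeadC ans customers[j] := by
        constructor
        · intro hs
          rw [← pvSatB_iff, ← hgj] at hs
          rw [hs] at hsb
          exact Bool.noConfusion hsb
        · intro q hq hfp
          have : pvFlipableB ans customers[j] = true := by
            rw [pvFlipableB_iff]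
            exact ⟨q, hq, hfp.1, hfp.2⟩
          rw [← hgj] at this
          rw [this] at hfb
          exact Bool.noConfusion hfb
      have hdec : customers = customers.take j ++ customers[j] :: customers.drop (j + 1) := by
        conv_lhs => rw [← List.take_append_drop j customers]
        congr 1
        exact List.drop_eq_getElem_cons hjlt
      have hA : serve_customers ans customers = false := by
        have : serve_customers ans customers =
            serveAuxA (ans.length + 1) ans customers
              (customers.take j ++ customers[j] :: customers.drop (j + 1)) := by
          unfold serve_customers
          rw [← hdec]
        rw [this]
        exact serveAuxA_pass_false ans customers _ _ _ _ hsatPre hdead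
      have hB : serve_customers_alt ans customers = false := by
        unfold serve_customers_alt
        simp only []
        rw [pvSumEq customers]
        have hsplit : PySem.List.pyRange 0 (customers.length : Int) 1 =
            PySem.List.pyRange 0 (j : Int) 1 ++ (j : Int) ::
              PySem.List.pyRange ((j : Int) + 1) (customers.length : Int) 1 := by
          rw [PySem.List.pyRange_one_append 0 (j : Int) (customers.length : Int)
            (by omega) (by omega)]
          congr 1
          rw [PySem.List.pyRange_one_cons (by omega)]
        rw [hsplit]
        apply pvLoopB_pass_false
        · rw [← hsplit]
          exact PySem.List.nodup_pyRange_one 0 (customers.length : Int)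
        · intro y _
          exact PySem.Dict.get?_empty y
        · intro y hy
          rw [PySem.List.mem_pyRange_one] at hy
          have hyt : y.toNat < customers.length := by omega
          rw [pvGetD_cust customers y hy.1 hyt]
          have hyj : y.toNat < j := by omega
          have := hpre y.toNat hyj
          simp only [Bool.and_eq_true] at this
          have := this.2
          rw [pvSatB_iff] at this
          exact this
        · have : PySem.List.pyGetD customers ((j : Int)) [] = customers[j] := by
            rw [pvGetD_cust customers (j : Int) (by omega) (by simpa using hjlt)]
            rw [List.getD_eq_getElem customers [] (by simpa using hjlt)]
            simp
          rw [this]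
          exact hdead
        · rw [PySem.List.length_pyRange_one]
          have h1 : ((customers.map (fun c => (pvDecode c).length)).sum + customers.length + 1) ≤
              ((customers.map (fun c => (pvDecode c).length)).sum + customers.length + 1) *
                (ans.count 0 + 1) := Nat.le_mul_of_pos_right _ (by omega)
          omega
      rw [hA, hB]
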